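-- pv_equiv track=rewrite | github.com/prot216/OMGTU | Olympiad/razvedka.py | razvedka
-- ===== SOURCE A (Python) =====
-- import math
--
-- def razvedka(n):
--     if n == 3:
--         return 1
--     elif n < 3:
--         return 0
--     elif n > 3:
--         group1 = math.floor(n/2)
--         group2 = math.floor(n/2) + (n%2)
--         return razvedka(group1) + razvedka(group2)
-- ===== SOURCE B (Python) =====
-- def razvedka(n):
--     # closed form: the balanced halving tree of n has leaves of sizes 2 and 3 only;
--     # with p = 2^(bit_length(n)-2), n lies in [2p,4p) and the answer is the number of 3-leaves.
--     if n < 2: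
--         return 0
--     p = 1 << (n.bit_length() - 2)
--     return 4 * p - n if n >= 3 * p else n - 2 * p
-- ===== Notes on version B (the rewrite author's own statement) =====
-- stated objective: faster
-- what changed: Replaced the O(n)-call recursive halving with a closed form: with p = 2^(bit_length(n)-2) the answer is 4p-n if n >= 3p else n-2p (the count of size-3 leaves of the balanced halving tree), computed without any recursion.
import Mathlib
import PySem

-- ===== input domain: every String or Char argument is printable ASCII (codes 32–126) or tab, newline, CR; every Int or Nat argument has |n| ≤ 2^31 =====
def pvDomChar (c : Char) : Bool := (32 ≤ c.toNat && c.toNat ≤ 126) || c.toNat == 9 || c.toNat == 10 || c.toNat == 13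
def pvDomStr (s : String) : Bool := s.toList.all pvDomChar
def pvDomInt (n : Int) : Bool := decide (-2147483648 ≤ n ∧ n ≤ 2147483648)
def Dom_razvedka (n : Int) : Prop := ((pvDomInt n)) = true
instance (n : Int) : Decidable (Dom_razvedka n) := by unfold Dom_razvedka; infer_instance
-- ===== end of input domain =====

-- B replaces A's recursive halving (one call per subinterval) by a closed form from n's bit length (objective: faster).

-- ===== PORT A =====
-- A's recursion, made total with a fuel counter (fuel n.toNat is always enough: each recursive
-- argument is smaller; the fuel is a Lean-only termination device, not part of the algorithm).
def razvedkaFuel : Nat → Int → Int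
  | 0, _ => 0
  | fuel + 1, n =>
    if n = 3 then 1
    else if n < 3 then 0
    else
      let group1 := PySem.Int.floordiv n 2
      let group2 := PySem.Int.floordiv n 2 + PySem.Int.mod n 2
      razvedkaFuel fuel group1 + razvedkaFuel fuel group2

def razvedka (n : Int) : Int := razvedkaFuel n.toNat n

-- ===== PORT B =====
def razvedka_alt (n : Int) : Int :=
  if n < 2 then 0
  else
    let p : Int := 2 ^ (PySem.Int.bitLength n - 2)
    if n ≥ 3 * p then 4 * p - n else n - 2 * p

-- ===== PRECONDITION & SPEC =====
def Spec_razvedka (n : Int) (out : Int) : Prop := out = razvedka_alt n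
instance (n : Int) (out : Int) : Decidable (Spec_razvedka n out) := by unfold Spec_razvedka; infer_instance

-- ===== CLAIM (what is proved, stated in full; the proofs are below) =====
def Claim_equal_razvedka : Prop := ∀ (n : Int), Dom_razvedka n → Spec_razvedka n (razvedka n)

-- ===== LEMMAS AND PROOFS =====

/-- The closed form, parametrised by the level `k` (for `n` in `[2^(k+1), 2^(k+2)]`). -/
def pvF (k : Nat) (n : Int) : Int :=
  if n ≥ 3 * 2 ^ k then 4 * 2 ^ k - n else n - 2 * 2 ^ k

/-- Any fuel at least `n.toNat` gives the same value. -/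
lemma razvedkaFuel_irrel (f1 : Nat) : ∀ (n : Int) (f2 : Nat), n.toNat ≤ f1 → n.toNat ≤ f2 →
    razvedkaFuel f1 n = razvedkaFuel f2 n := by
  induction f1 with
  | zero =>
    intro n f2 h1 _
    cases f2 with
    | zero => rfl
    | succ g =>
      show (0 : Int) = razvedkaFuel (g + 1) n
      simp only [razvedkaFuel]
      rw [if_neg (by omega), if_pos (by omega)]
  | succ f ih =>
    intro n f2 h1 h2
    cases f2 with
    | zero =>
      show razvedkaFuel (f + 1) n = (0 : Int)
      simp only [razvedkaFuel]
      rw [if_neg (by omega), if_pos (by omega)]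
    | succ g =>
      simp only [razvedkaFuel]
      by_cases h3 : n = 3
      · simp [h3]
      · rw [if_neg h3, if_neg h3]
        by_cases hlt : n < 3
        · rw [if_pos hlt, if_pos hlt]
        · rw [if_neg hlt, if_neg hlt]
          have hfd : PySem.Int.floordiv n 2 = n / 2 :=
            PySem.Int.floordiv_eq_ediv_of_pos (by omega)
          have hmd : PySem.Int.mod n 2 = n % 2 :=
            PySem.Int.mod_eq_emod_of_pos (by omega)
          rw [hfd, hmd,
            ih (n / 2) g (by omega) (by omega),
            ih (n / 2 + n % 2) g (by omega) (by omega)]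

/-- A's recursion equation at its own recursive arguments. -/
lemma razvedka_unfold (n : Int) (h : 3 < n) :
    razvedka n = razvedka (PySem.Int.floordiv n 2)
      + razvedka (PySem.Int.floordiv n 2 + PySem.Int.mod n 2) := by
  have hfd : PySem.Int.floordiv n 2 = n / 2 := PySem.Int.floordiv_eq_ediv_of_pos (by omega)
  have hmd : PySem.Int.mod n 2 = n % 2 := PySem.Int.mod_eq_emod_of_pos (by omega)
  show razvedkaFuel n.toNat n = _
  have hn : n.toNat = (n.toNat - 1) + 1 := by omega
  rw [hn]
  simp only [razvedkaFuel]
  rw [if_neg (by omega), if_neg (by omega), hfd, hmd]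
  unfold razvedka
  rw [razvedkaFuel_irrel (n.toNat - 1) (n / 2) (n / 2).toNat (by omega) le_rfl,
    razvedkaFuel_irrel (n.toNat - 1) (n / 2 + n % 2) (n / 2 + n % 2).toNat (by omega) le_rfl]

lemma razvedka_char (k : Nat) : ∀ n : Int, 2 ^ (k + 1) ≤ n → n ≤ 2 ^ (k + 2) →
    razvedka n = pvF k n := by
  induction k with
  | zero =>
    intro n h1 h2
    norm_num at h1 h2
    interval_cases n
    · decide
    · decide
    · decide
  | succ k ih =>
    intro n h1 h2
    by_cases hn : n = 2 ^ (k + 2)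
    · subst hn
      rw [ih _ (pow_le_pow_right₀ (by norm_num) (by omega)) le_rfl]
      have hP : (1:Int) ≤ 2 ^ k := one_le_pow₀ (by norm_num)
      simp only [pvF, pow_succ]
      generalize (2:Int) ^ k = P at hP ⊢
      split_ifs <;> omega
    · have hP : (1:Int) ≤ 2 ^ k := one_le_pow₀ (by norm_num)
      have h1' : 2 * (2 * (2 ^ k)) ≤ n := by
        have := h1; simp only [pow_succ] at this; linarith
      have h2' : n ≤ 2 * (2 * (2 * (2 ^ k))) := by
        have := h2; simp only [pow_succ] at this; linarith
      have hn4 : 3 < n := by nlinarith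
      rw [razvedka_unfold n hn4]
      rw [PySem.Int.floordiv_eq_ediv_of_pos (by omega : (0:Int) < 2),
        PySem.Int.mod_eq_emod_of_pos (by omega : (0:Int) < 2)]
      have hne : n ≠ 2 ^ (k + 2) := hn
      simp only [pow_succ] at hne
      have ha := ih (n / 2) (by simp only [pow_succ]; omega) (by simp only [pow_succ]; omega)
      have hb := ih (n / 2 + n % 2) (by simp only [pow_succ]; omega)
        (by simp only [pow_succ]; omega)
      simp only [ha, hb, pvF, pow_succ]
      generalize (2:Int) ^ k = P at *
      split_ifs <;> omega

lemma bitLength_bounds (n : Int) (h : 2 ≤ n) :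
    2 ≤ PySem.Int.bitLength n ∧
    2 ^ (PySem.Int.bitLength n - 1) ≤ n ∧ n ≤ 2 ^ (PySem.Int.bitLength n) := by
  have hne : n ≠ 0 := by omega
  have hlo := PySem.Int.two_pow_bitLength_le n hne
  have hhi := PySem.Int.lt_two_pow_bitLength n
  have habs : (n.natAbs : Int) = n := Int.natAbs_of_nonneg (by omega)
  have hL : 2 ≤ PySem.Int.bitLength n := by
    by_contra hc
    have hle : (2:Nat) ^ PySem.Int.bitLength n ≤ 2 ^ 1 :=
      Nat.pow_le_pow_right (by norm_num) (by omega)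
    omega
  refine ⟨hL, ?_, ?_⟩
  · calc ((2:Int)) ^ (PySem.Int.bitLength n - 1)
        = ((2 ^ (PySem.Int.bitLength n - 1) : Nat) : Int) := by push_cast; ring
    _ ≤ (n.natAbs : Int) := by exact_mod_cast hlo
    _ = n := habs
  · calc n = (n.natAbs : Int) := habs.symm
    _ ≤ ((2 ^ PySem.Int.bitLength n : Nat) : Int) := by exact_mod_cast hhi.le
    _ = 2 ^ (PySem.Int.bitLength n) := by push_cast; ring

-- ===== VERDICT (by name: the statement is the Claim_ definition above) =====
theorem razvedka_spec : Claim_equal_razvedka := by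
  intro n _
  unfold Spec_razvedka
  by_cases h2 : n < 2
  · have hz : razvedka n = 0 := by
      unfold razvedka
      cases hf : n.toNat with
      | zero => rfl
      | succ g =>
        simp only [razvedkaFuel]
        rw [if_neg (by omega), if_pos (by omega)]
    rw [hz, razvedka_alt, if_pos h2]
  · push Not at h2
    obtain ⟨hL, hlo, hhi⟩ := bitLength_bounds n h2
    have hk1 : PySem.Int.bitLength n - 2 + 1 = PySem.Int.bitLength n - 1 := by omega
    have hk2 : PySem.Int.bitLength n - 2 + 2 = PySem.Int.bitLength n := by omega
    rw [razvedka_char (PySem.Int.bitLength n - 2) n (by rw [hk1]; exact hlo)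
      (by rw [hk2]; exact hhi)]
    rw [razvedka_alt, if_neg (by omega)]
    rfl
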